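-- pv_equiv track=rewrite | github.com/wangchan0708/Junyiacademy_Test | Q2.py | number_count
-- ===== SOURCE A (Python) =====
-- def number_count(input):
--     list=[]
--     for i in range(1,input+1):
--         if i%15==0:
--             list.append(i)
--         elif (i%3==0) or (i%5==0):
--            continue
--         else:
--             list.append(i)
--     return len(list)
-- ===== SOURCE B (Python) =====
-- def number_count(input):
--     # Closed-form inclusion-exclusion count; O(1) instead of A's O(n) loop.
--     m = max(input, 0)
--     return m - m // 3 - m // 5 + 2 * (m // 15)
-- ===== Notes on version B (the rewrite author's own statement) =====
-- stated objective: faster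
-- what changed: Replaces the linear loop that builds a list of qualifying numbers with a constant-time inclusion-exclusion closed form over the divisors three, five and fifteen, clamping negative inputs to zero.
import Mathlib
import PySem

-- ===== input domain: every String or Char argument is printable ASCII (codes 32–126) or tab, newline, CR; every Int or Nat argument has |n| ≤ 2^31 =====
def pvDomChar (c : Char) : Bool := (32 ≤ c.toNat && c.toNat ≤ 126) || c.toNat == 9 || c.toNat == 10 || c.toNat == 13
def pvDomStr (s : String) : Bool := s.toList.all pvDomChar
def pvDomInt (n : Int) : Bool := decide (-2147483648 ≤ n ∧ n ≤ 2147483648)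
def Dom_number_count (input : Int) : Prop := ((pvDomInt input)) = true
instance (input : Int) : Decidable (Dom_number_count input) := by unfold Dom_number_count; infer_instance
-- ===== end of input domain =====

-- B replaces A's O(n) list-building loop by the O(1) inclusion-exclusion closed form.
-- ===== PORT A =====
def number_count (input : Int) : Int :=
  -- Python 'list.append' is O(1) on a dynamic array; ported as Array.push
  let list := (PySem.List.pyRange 1 (input + 1) 1).foldl (fun acc i =>
    if PySem.Int.mod i 15 = 0 then acc.push i
    else if PySem.Int.mod i 3 = 0 ∨ PySem.Int.mod i 5 = 0 then acc
    else acc.push i) (#[] : Array Int)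
  (list.size : Int)

-- ===== PORT B =====
def number_count_alt (input : Int) : Int :=
  let m := max input 0
  m - PySem.Int.floordiv m 3 - PySem.Int.floordiv m 5 + 2 * PySem.Int.floordiv m 15

-- ===== PRECONDITION & SPEC =====
def Spec_number_count (input : Int) (out : Int) : Prop := out = number_count_alt input
instance (input : Int) (out : Int) : Decidable (Spec_number_count input out) := by unfold Spec_number_count; infer_instance

-- ===== CLAIM (what is proved, stated in full; the proofs are below) =====
def Claim_equal_number_count : Prop := ∀ (input : Int), Dom_number_count input → Spec_number_count input (number_count input)

-- ===== LEMMAS AND PROOFS =====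

-- A's loop body appends i exactly when p i holds
def pvKeep (i : Int) : Bool :=
  decide (PySem.Int.mod i 15 = 0) ||
    (!(decide (PySem.Int.mod i 3 = 0) || decide (PySem.Int.mod i 5 = 0)))

theorem pvFold_eq_filter (l : List Int) (acc : Array Int) :
    (l.foldl (fun acc i =>
      if PySem.Int.mod i 15 = 0 then acc.push i
      else if PySem.Int.mod i 3 = 0 ∨ PySem.Int.mod i 5 = 0 then acc
      else acc.push i) acc).toList = acc.toList ++ l.filter pvKeep := by
  induction l generalizing acc with
  | nil => simp
  | cons x xs ih =>
    simp only [List.foldl_cons, List.filter_cons, ih, pvKeep]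
    by_cases h15 : (15:Int) ∣ x
    · have e15 : PySem.Int.mod x 15 = 0 := (PySem.Int.mod_eq_zero_iff_dvd x 15).mpr h15
      simp [h15]
    · have e15 : ¬ PySem.Int.mod x 15 = 0 := fun h => h15 ((PySem.Int.mod_eq_zero_iff_dvd x 15).mp h)
      by_cases h3 : (3:Int) ∣ x
      · have e3 : PySem.Int.mod x 3 = 0 := (PySem.Int.mod_eq_zero_iff_dvd x 3).mpr h3
        simp [h3, h15]
      · have e3 : ¬ PySem.Int.mod x 3 = 0 := fun h => h3 ((PySem.Int.mod_eq_zero_iff_dvd x 3).mp h)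
        by_cases h5 : (5:Int) ∣ x
        · have e5 : PySem.Int.mod x 5 = 0 := (PySem.Int.mod_eq_zero_iff_dvd x 5).mpr h5
          simp [h3, h5, h15]
        · have e5 : ¬ PySem.Int.mod x 5 = 0 := fun h => h5 ((PySem.Int.mod_eq_zero_iff_dvd x 5).mp h)
          simp [h3, h5, h15]

set_option maxHeartbeats 1000000 in
theorem pvStep (k q3 q5 q15 p3 p5 p15 r3 r5 r15 s3 s5 s15 c : Nat)
    (h1 : k = 3*q3 + r3) (hr3 : r3 < 3) (h2 : k = 5*q5 + r5) (hr5 : r5 < 5)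
    (h3 : k = 15*q15 + r15) (hr15 : r15 < 15)
    (g1 : k+1 = 3*p3 + s3) (hs3 : s3 < 3) (g2 : k+1 = 5*p5 + s5) (hs5 : s5 < 5)
    (g3 : k+1 = 15*p15 + s15) (hs15 : s15 < 15)
    (hA : s15 % 3 = s3) (hB : s15 % 5 = s5)
    (hc : c = (if s15 = 0 then 1 else if s3 = 0 then 0 else if s5 = 0 then 0 else 1)) :
    c + p3 + p5 + 2*q15 = 1 + q3 + q5 + 2*p15 := by
  interval_cases s15 <;> subst hA hB <;> norm_num at hc <;> omega

theorem pvCount_closed (m : Nat) :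
    (((PySem.List.pyRange 1 ((m : Int) + 1) 1).filter pvKeep).length : Int)
      = (m : Int) - PySem.Int.floordiv (m : Int) 3 - PySem.Int.floordiv (m : Int) 5
        + 2 * PySem.Int.floordiv (m : Int) 15 := by
  induction m with
  | zero =>
    rw [PySem.List.pyRange_one_eq_nil (by norm_num)]
    simp [PySem.Int.floordiv]
  | succ k ih =>
    have h : ((k : Int) + 1 + 1) = ((k : Int) + 1) + 1 := by ring
    have hk : (1 : Int) ≤ (k : Int) + 1 := by omega
    have hcast : ((k + 1 : Nat) : Int) = (k : Int) + 1 := by push_cast; ring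
    rw [hcast, h, PySem.List.pyRange_one_succ_right hk, List.filter_append,
      List.length_append]
    push_cast
    rw [ih]
    have hmod : ∀ d : Nat, 0 < d → PySem.Int.mod ((k:Int)+1) d = (((k+1) % d : Nat) : Int) := by
      intro d hd
      have := PySem.Int.mod_natCast (k+1) d
      rw [show (((k+1 : Nat)) : Int) = (k:Int)+1 by push_cast; ring] at this
      exact this
    have hdiv : ∀ (a : Nat) (d : Nat), PySem.Int.floordiv ((a:Int)) d = ((a / d : Nat) : Int) :=
      fun a d => PySem.Int.floordiv_natCast a d
    have h3 := hdiv (k+1) 3; have h5 := hdiv (k+1) 5; have h15 := hdiv (k+1) 15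
    rw [show (((k+1 : Nat)) : Int) = (k:Int)+1 by push_cast; ring] at h3 h5 h15
    simp only [Nat.cast_ofNat] at h3 h5 h15
    rw [h3, h5, h15]
    have g3 := hdiv k 3; have g5 := hdiv k 5; have g15 := hdiv k 15
    simp only [Nat.cast_ofNat] at g3 g5 g15
    rw [g3, g5, g15]
    have d3 : ((3:Int) ∣ (k:Int)+1) ↔ (k+1)%3 = 0 := by omega
    have d5 : ((5:Int) ∣ (k:Int)+1) ↔ (k+1)%5 = 0 := by omega
    have d15 : ((15:Int) ∣ (k:Int)+1) ↔ (k+1)%15 = 0 := by omega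
    by_cases b15 : (k+1) % 15 = 0
    · have b3 : (k+1) % 3 = 0 := by omega
      have hf : (List.filter pvKeep [(k:Int)+1]).length = 1 := by
        simp [List.filter, pvKeep, d3, d5, d15, b15, b3]
      rw [hf]
      have E := pvStep k (k/3) (k/5) (k/15) ((k+1)/3) ((k+1)/5) ((k+1)/15) (k%3) (k%5) (k%15) ((k+1)%3) ((k+1)%5) ((k+1)%15) 1
        (by omega) (by omega) (by omega) (by omega) (by omega) (by omega)
        (by omega) (by omega) (by omega) (by omega) (by omega) (by omega) (by omega) (by omega)
        (by simp [b15, b3])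
      have E' := congrArg (fun n : Nat => (n : Int)) E
      push_cast at E' ⊢
      linarith
    · by_cases b3 : (k+1) % 3 = 0
      · have hf : (List.filter pvKeep [(k:Int)+1]).length = 0 := by
          simp [List.filter, pvKeep, d3, d5, d15, b15, b3]
        rw [hf]
        have E := pvStep k (k/3) (k/5) (k/15) ((k+1)/3) ((k+1)/5) ((k+1)/15) (k%3) (k%5) (k%15) ((k+1)%3) ((k+1)%5) ((k+1)%15) 0
          (by omega) (by omega) (by omega) (by omega) (by omega) (by omega)
          (by omega) (by omega) (by omega) (by omega) (by omega) (by omega) (by omega) (by omega)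
          (by simp [b15, b3])
        have E' := congrArg (fun n : Nat => (n : Int)) E
        push_cast at E' ⊢
        linarith
      · by_cases b5 : (k+1) % 5 = 0
        · have hf : (List.filter pvKeep [(k:Int)+1]).length = 0 := by
            simp [List.filter, pvKeep, d3, d5, d15, b15, b3, b5]
          rw [hf]
          have E := pvStep k (k/3) (k/5) (k/15) ((k+1)/3) ((k+1)/5) ((k+1)/15) (k%3) (k%5) (k%15) ((k+1)%3) ((k+1)%5) ((k+1)%15) 0
            (by omega) (by omega) (by omega) (by omega) (by omega) (by omega)
            (by omega) (by omega) (by omega) (by omega) (by omega) (by omega) (by omega) (by omega)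
            (by simp [b15, b3, b5])
          have E' := congrArg (fun n : Nat => (n : Int)) E
          push_cast at E' ⊢
          linarith
        · have hf : (List.filter pvKeep [(k:Int)+1]).length = 1 := by
            simp [List.filter, pvKeep, d3, d5, d15, b15, b3, b5]
          rw [hf]
          have E := pvStep k (k/3) (k/5) (k/15) ((k+1)/3) ((k+1)/5) ((k+1)/15) (k%3) (k%5) (k%15) ((k+1)%3) ((k+1)%5) ((k+1)%15) 1
            (by omega) (by omega) (by omega) (by omega) (by omega) (by omega)
            (by omega) (by omega) (by omega) (by omega) (by omega) (by omega) (by omega) (by omega)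
            (by simp [b15, b3, b5])
          have E' := congrArg (fun n : Nat => (n : Int)) E
          push_cast at E' ⊢
          linarith

-- ===== VERDICT (by name: the statement is the Claim_ definition above) =====
theorem number_count_spec : Claim_equal_number_count := by
  intro input _
  unfold Spec_number_count number_count number_count_alt
  simp only [← Array.length_toList, pvFold_eq_filter, Array.toList_empty, List.nil_append]
  by_cases hpos : 0 ≤ input
  · have hm : max input 0 = input := by omega
    obtain ⟨m, rfl⟩ := Int.eq_ofNat_of_zero_le hpos
    rw [hm]
    exact pvCount_closed m
  · have hnil : PySem.List.pyRange 1 (input + 1) 1 = [] :=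
      PySem.List.pyRange_one_eq_nil (by omega)
    have hm : max input 0 = 0 := by omega
    rw [hnil, hm]
    simp [PySem.Int.floordiv]
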